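-- pv_equiv track=rewrite | github.com/PeterBjerreHansen/multi-pass-transformer-training | tasks/repl.py | token_ids_to_trace_lines
-- ===== SOURCE A (Python) =====
-- from typing import Dict, List, Sequence, Tuple
--
-- PAD_TOKEN = "<pad>"
--
-- BOS_TOKEN = "<bos>"
--
-- SEP_TOKEN = "<sep>"
--
-- STATE_TOKEN = "<state>"
--
-- OUTPUT_TOKEN = "<output>"
--
-- EOS_TOKEN = "<eos>"
--
-- NEWLINE_TOKEN = "<nl>"
--
-- PROMPT_TOKEN = ">>>"
--
-- PRINT_TOKEN = "print"
--
-- COMMA_TOKEN = ","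
--
-- def decode_ids(ids: Sequence[int], itos: Dict[int, str]) -> List[str]:
--     return [itos[int(i)] for i in ids]
--
-- def token_ids_to_trace_lines(ids: Sequence[int], itos: Dict[int, str]) -> List[str]:
--     tokens = decode_ids(ids, itos)
--     lines: List[str] = []
--     current: List[str] = []
--     for token in tokens:
--         if token in {PAD_TOKEN, BOS_TOKEN}:
--             continue
--         if token == EOS_TOKEN:
--             if current:
--                 lines.append(_tokens_to_line(current))
--             break
--         if token == NEWLINE_TOKEN:
--             lines.append(_tokens_to_line(current))
--             current = []
--             continue
--         if token == SEP_TOKEN: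
--             if current:
--                 lines.append(_tokens_to_line(current))
--                 current = []
--             lines.append(SEP_TOKEN)
--             continue
--         current.append(token)
--     if current:
--         lines.append(_tokens_to_line(current))
--     return lines
--
-- def _tokens_to_line(tokens: Sequence[str]) -> str:
--     if not tokens:
--         return ""
--     head = tokens[0]
--     if head == PROMPT_TOKEN:
--         if tokens[1] == PRINT_TOKEN:
--             return f"{PROMPT_TOKEN} {PRINT_TOKEN} {tokens[2]}"
--         return f"{PROMPT_TOKEN} {tokens[1]} = {tokens[3]} {tokens[4]} {tokens[5]}" if len(tokens) == 6 else f"{PROMPT_TOKEN} {tokens[1]} = {tokens[3]}"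
--     if head == STATE_TOKEN:
--         parts: List[str] = []
--         index = 1
--         while index < len(tokens):
--             var_name = tokens[index]
--             value = tokens[index + 1]
--             parts.append(f"{var_name} {value}")
--             index += 2
--             if index < len(tokens) and tokens[index] == COMMA_TOKEN:
--                 index += 1
--         return f"{STATE_TOKEN} " + " , ".join(parts)
--     if head == OUTPUT_TOKEN:
--         return f"{OUTPUT_TOKEN} {tokens[1]} {tokens[2]}"
--     raise ValueError(f"Unsupported token line: {tokens}")
-- ===== SOURCE B (Python) =====
-- from typing import Dict, List, Sequence
--
-- PAD_TOKEN = "<pad>"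
-- BOS_TOKEN = "<bos>"
-- SEP_TOKEN = "<sep>"
-- STATE_TOKEN = "<state>"
-- OUTPUT_TOKEN = "<output>"
-- EOS_TOKEN = "<eos>"
-- NEWLINE_TOKEN = "<nl>"
-- PROMPT_TOKEN = ">>>"
-- PRINT_TOKEN = "print"
-- COMMA_TOKEN = ","
--
--
-- def _tokens_to_line(tokens: Sequence[str]) -> str:
--     if not tokens:
--         return ""
--     head = tokens[0]
--     if head == PROMPT_TOKEN:
--         if tokens[1] == PRINT_TOKEN:
--             return f"{PROMPT_TOKEN} {PRINT_TOKEN} {tokens[2]}"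
--         return f"{PROMPT_TOKEN} {tokens[1]} = {tokens[3]} {tokens[4]} {tokens[5]}" if len(tokens) == 6 else f"{PROMPT_TOKEN} {tokens[1]} = {tokens[3]}"
--     if head == STATE_TOKEN:
--         parts: List[str] = []
--         index = 1
--         while index < len(tokens):
--             var_name = tokens[index]
--             value = tokens[index + 1]
--             parts.append(f"{var_name} {value}")
--             index += 2
--             if index < len(tokens) and tokens[index] == COMMA_TOKEN:
--                 index += 1
--         return f"{STATE_TOKEN} " + " , ".join(parts)
--     if head == OUTPUT_TOKEN:
--         return f"{OUTPUT_TOKEN} {tokens[1]} {tokens[2]}"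
--     raise ValueError(f"Unsupported token line: {tokens}")
--
--
-- def _emit(toks: List[str]) -> List[str]:
--     """Render a PAD/BOS-free token stream by prefix splitting: find the first
--     delimiter, slice off the prefix, render it, recurse on the remainder.
--     NEWLINE renders the prefix even when empty; SEP renders only a non-empty
--     prefix then emits the marker; EOS renders a non-empty prefix once and stops
--     (the original flushed it twice, which is the fixed bug)."""
--     for j, t in enumerate(toks):
--         if t in (EOS_TOKEN, NEWLINE_TOKEN, SEP_TOKEN):
--             pre, rest = toks[:j], toks[j + 1:]
--             if t == EOS_TOKEN:
--                 return [_tokens_to_line(pre)] if pre else []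
--             if t == NEWLINE_TOKEN:
--                 return [_tokens_to_line(pre)] + _emit(rest)
--             return ([_tokens_to_line(pre)] if pre else []) + [SEP_TOKEN] + _emit(rest)
--     return [_tokens_to_line(toks)] if toks else []
--
--
-- def token_ids_to_trace_lines(ids: Sequence[int], itos: Dict[int, str]) -> List[str]:
--     toks = [t for t in (itos[int(i)] for i in ids) if t not in (PAD_TOKEN, BOS_TOKEN)]
--     return _emit(toks)
-- ===== Notes on version B (the rewrite author's own statement) =====
-- stated objective: alternative
-- what changed: A's streaming loop with a mutable current-line accumulator is replaced by a recursive prefix-splitting decomposition: filter PAD/BOS once, then repeatedly find the first delimiter, slice off and render the prefix, and recurse on the remainder; the EOS double-flush bug is fixed.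
-- intended difference: On inputs whose decoded PAD/BOS-free stream contains EOS with a pending (non-empty, not just-flushed) line before its first EOS, A appends that rendered line twice (it flushes on EOS, breaks without clearing current, and the post-loop flush appends it again); B emits it once, which is clearly the intended output. — e.g. on token_ids_to_trace_lines([5, 6, 7, 2], [(2, "<eos>"), (5, ">>>"), (6, "print"), (7, "5")]): A returns [">>> print 5", ">>> print 5"], B returns [">>> print 5"]
import Mathlib
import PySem

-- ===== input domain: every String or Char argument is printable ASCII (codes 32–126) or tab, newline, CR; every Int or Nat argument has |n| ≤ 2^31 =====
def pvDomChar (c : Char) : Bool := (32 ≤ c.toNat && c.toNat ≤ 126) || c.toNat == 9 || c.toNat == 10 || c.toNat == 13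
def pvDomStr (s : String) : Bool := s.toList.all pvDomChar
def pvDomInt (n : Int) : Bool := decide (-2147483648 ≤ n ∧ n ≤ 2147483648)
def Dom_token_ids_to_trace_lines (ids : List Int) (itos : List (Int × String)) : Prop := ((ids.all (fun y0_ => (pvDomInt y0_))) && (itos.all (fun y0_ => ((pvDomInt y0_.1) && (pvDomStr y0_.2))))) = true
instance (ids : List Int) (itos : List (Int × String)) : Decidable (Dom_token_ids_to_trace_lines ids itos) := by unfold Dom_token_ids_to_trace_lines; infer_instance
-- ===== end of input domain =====

-- B replaces A's streaming accumulator loop by a recursive prefix-splitting pass and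
-- fixes A's EOS double-flush (D_ below); return-value equivalence only.

-- ===== PORT A =====

-- shared helper: literal port of _tokens_to_line (both Pythons call it unchanged).
-- Python raises IndexError/ValueError on malformed lines; there the pyGetD default ""
-- (resp. the final "" branch) is reached — exactly those lines are excluded by Pre_.
def pvStateParts : List String → List String
  | [] => []
  | [v] => [v ++ " "]                     -- Python raises IndexError here (excluded by Pre_)
  | [v, x] => [v ++ " " ++ x]
  | v :: x :: c :: rs =>
      (v ++ " " ++ x) :: (if c = "," then pvStateParts rs else pvStateParts (c :: rs))

def pvTokensToLine (ts : List String) : String :=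
  match ts with
  | [] => ""
  | head :: _ =>
    if head = ">>>" then
      if PySem.List.pyGetD ts 1 "" = "print" then
        ">>> print " ++ PySem.List.pyGetD ts 2 ""
      else if ts.length = 6 then
        ">>> " ++ PySem.List.pyGetD ts 1 "" ++ " = " ++ PySem.List.pyGetD ts 3 "" ++ " " ++
          PySem.List.pyGetD ts 4 "" ++ " " ++ PySem.List.pyGetD ts 5 ""
      else
        ">>> " ++ PySem.List.pyGetD ts 1 "" ++ " = " ++ PySem.List.pyGetD ts 3 ""
    else if head = "<state>" then
      "<state> " ++ String.intercalate " , " (pvStateParts ts.tail)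
    else if head = "<output>" then
      "<output> " ++ PySem.List.pyGetD ts 1 "" ++ " " ++ PySem.List.pyGetD ts 2 ""
    else
      ""                                   -- Python raises ValueError here (excluded by Pre_)

-- A's single loop: state = (lines so far, current); EOS = flush-then-break, after which
-- the post-loop flush runs again on the un-reset current (inlined in the EOS branch).
def pvLoopA : List String → List String → List String → List String
  | [], lines, current =>
      if current = [] then lines else lines ++ [pvTokensToLine current]
  | t :: rest, lines, current =>
      if t = "<pad>" ∨ t = "<bos>" then pvLoopA rest lines current
      else if t = "<eos>" then
        let lines' := if current = [] then lines else lines ++ [pvTokensToLine current]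
        if current = [] then lines' else lines' ++ [pvTokensToLine current]
      else if t = "<nl>" then pvLoopA rest (lines ++ [pvTokensToLine current]) []
      else if t = "<sep>" then
        pvLoopA rest ((if current = [] then lines
                       else lines ++ [pvTokensToLine current]) ++ ["<sep>"]) []
      else pvLoopA rest lines (current ++ [t])

def token_ids_to_trace_lines (ids : List Int) (itos : List (Int × String)) : List String :=
  let tokens := ids.map (fun i => (itos.lookup i).getD "")   -- KeyError excluded by Pre_
  pvLoopA tokens [] []

-- ===== PORT B =====

-- a delimiter token of the stream (Source B's `t in (EOS_TOKEN, NEWLINE_TOKEN, SEP_TOKEN)`)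
def pvNondelim (t : String) : Bool := !(t == "<eos>" || t == "<nl>" || t == "<sep>")

-- Source B's _emit: find the first delimiter, slice off the prefix, render, recurse.
def pvEmit (toks : List String) : List String :=
  match h : toks.dropWhile pvNondelim with
  | [] => if toks = [] then [] else [pvTokensToLine toks]
  | t :: rest =>
    let pre := toks.takeWhile pvNondelim
    if t = "<eos>" then (if pre = [] then [] else [pvTokensToLine pre])
    else if t = "<nl>" then pvTokensToLine pre :: pvEmit rest
    else (if pre = [] then [] else [pvTokensToLine pre]) ++ "<sep>" :: pvEmit rest
termination_by toks.length
decreasing_by all_goals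
  (have h1 := List.length_dropWhile_le pvNondelim toks; rw [h] at h1; simp at h1; omega)

def token_ids_to_trace_lines_alt (ids : List Int) (itos : List (Int × String)) : List String :=
  pvEmit (((ids.map (fun i => (itos.lookup i).getD "")).filter
    (fun t => !(t = "<pad>" || t = "<bos>"))))

-- ===== PRECONDITION & SPEC =====

-- validity of one flushed line (where Python's _tokens_to_line returns instead of raising)
def pvStateOk : List String → Bool
  | [] => true
  | [_] => false
  | [_, _] => true
  | _ :: _ :: c :: rs => if c = "," then pvStateOk rs else pvStateOk (c :: rs)

def pvLineOk (ts : List String) : Bool :=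
  match ts with
  | [] => true
  | head :: rest =>
    if head = ">>>" then
      decide (ts.length ≥ 2) &&
        (if PySem.List.pyGetD ts 1 "" = "print" then decide (ts.length ≥ 3)
         else decide (ts.length ≥ 4))
    else if head = "<state>" then pvStateOk rest
    else if head = "<output>" then decide (ts.length ≥ 3)
    else false

-- Pre_ = exactly where Python A returns: every id is a key of itos (else KeyError), and in
-- the decoded stream — PAD/BOS dropped, truncated at the first EOS — every maximal run of
-- tokens between NEWLINE/SEP delimiters is a well-formed line (else _tokens_to_line raises
-- IndexError/ValueError on the flushed line).
def Pre_token_ids_to_trace_lines (ids : List Int) (itos : List (Int × String)) : Prop :=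
  (∀ i ∈ ids, (itos.lookup i).isSome) ∧
  ∀ seg ∈ ((((ids.map (fun i => (itos.lookup i).getD "")).filter
        (fun t => !(t = "<pad>" || t = "<bos>"))).takeWhile (fun t => !(t = "<eos>"))).splitOnP
        (fun t => t = "<nl>" || t = "<sep>")), pvLineOk seg = true

instance (ids : List Int) (itos : List (Int × String)) : Decidable (Pre_token_ids_to_trace_lines ids itos) := by unfold Pre_token_ids_to_trace_lines; infer_instance

def pvWitness_token_ids_to_trace_lines : List Int × (List (Int × String)) :=
  ([1, 5, 6, 7, 3, 4, 11, 9, 7, 3],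
   [(0, "<pad>"), (1, "<bos>"), (2, "<eos>"), (3, "<nl>"), (4, "<sep>"),
    (5, ">>>"), (6, "print"), (7, "5"), (9, "x"), (11, "<output>")])

-- On inputs whose decoded PAD/BOS-free stream has a non-empty pending line just before its
-- first EOS, A flushes that rendered line twice (flush on EOS, break without clearing
-- current, post-loop flush again); B emits it once, the intended output.
def pvStream (ids : List Int) (itos : List (Int × String)) : List String :=
  ids.filterMap (fun i =>
    let t := ((itos.find? (fun kv => i == kv.1)).map Prod.snd).getD ""
    if t = "<pad>" ∨ t = "<bos>" then none else some t)

def D_token_ids_to_trace_lines (ids : List Int) (itos : List (Int × String)) : Prop :=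
  (pvStream ids itos).idxOf "<eos>" < (pvStream ids itos).length ∧
  ((pvStream ids itos).take ((pvStream ids itos).idxOf "<eos>")).getLastD "<nl>" ≠ "<nl>" ∧
  ((pvStream ids itos).take ((pvStream ids itos).idxOf "<eos>")).getLastD "<nl>" ≠ "<sep>"

instance (ids : List Int) (itos : List (Int × String)) : Decidable (D_token_ids_to_trace_lines ids itos) := by unfold D_token_ids_to_trace_lines; infer_instance

def Spec_token_ids_to_trace_lines (ids : List Int) (itos : List (Int × String)) (out : List String) : Prop := ¬ D_token_ids_to_trace_lines ids itos → out = token_ids_to_trace_lines_alt ids itos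
instance (ids : List Int) (itos : List (Int × String)) (out : List String) : Decidable (Spec_token_ids_to_trace_lines ids itos out) := by unfold Spec_token_ids_to_trace_lines; infer_instance

def pvDiffWitness_token_ids_to_trace_lines : List Int × (List (Int × String)) :=
  ([5, 6, 7, 2],
   [(2, "<eos>"), (5, ">>>"), (6, "print"), (7, "5")])

def pvDiffWitnessOut_token_ids_to_trace_lines : (List String) × (List String) :=
  ([">>> print 5", ">>> print 5"], [">>> print 5"])

-- ===== CLAIM (what is proved, stated in full; the proofs are below) =====
def Claim_unchanged_token_ids_to_trace_lines : Prop := ∀ (ids : List Int) (itos : List (Int × String)), Dom_token_ids_to_trace_lines ids itos → Pre_token_ids_to_trace_lines ids itos → Spec_token_ids_to_trace_lines ids itos (token_ids_to_trace_lines ids itos)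
def Claim_changed_token_ids_to_trace_lines : Prop := Dom_token_ids_to_trace_lines (pvDiffWitness_token_ids_to_trace_lines.1) (pvDiffWitness_token_ids_to_trace_lines.2) ∧ Pre_token_ids_to_trace_lines (pvDiffWitness_token_ids_to_trace_lines.1) (pvDiffWitness_token_ids_to_trace_lines.2) ∧ D_token_ids_to_trace_lines (pvDiffWitness_token_ids_to_trace_lines.1) (pvDiffWitness_token_ids_to_trace_lines.2) ∧ token_ids_to_trace_lines (pvDiffWitness_token_ids_to_trace_lines.1) (pvDiffWitness_token_ids_to_trace_lines.2) = pvDiffWitnessOut_token_ids_to_trace_lines.1 ∧ token_ids_to_trace_lines_alt (pvDiffWitness_token_ids_to_trace_lines.1) (pvDiffWitness_token_ids_to_trace_lines.2) = pvDiffWitnessOut_token_ids_to_trace_lines.2 ∧ pvDiffWitnessOut_token_ids_to_trace_lines.1 ≠ pvDiffWitnessOut_token_ids_to_trace_lines.2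
def Claim_exact_token_ids_to_trace_lines : Prop := ∀ (ids : List Int) (itos : List (Int × String)), Dom_token_ids_to_trace_lines ids itos → Pre_token_ids_to_trace_lines ids itos → D_token_ids_to_trace_lines ids itos → token_ids_to_trace_lines ids itos ≠ token_ids_to_trace_lines_alt ids itos

-- ===== LEMMAS AND PROOFS =====

-- A's behaviour, rephrased in B's prefix-splitting shape: identical to pvEmit except
-- that the pending line at EOS is flushed twice.
def pvEmitA (toks : List String) : List String :=
  match h : toks.dropWhile pvNondelim with
  | [] => if toks = [] then [] else [pvTokensToLine toks]
  | t :: rest =>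
    let pre := toks.takeWhile pvNondelim
    if t = "<eos>" then (if pre = [] then [] else [pvTokensToLine pre, pvTokensToLine pre])
    else if t = "<nl>" then pvTokensToLine pre :: pvEmitA rest
    else (if pre = [] then [] else [pvTokensToLine pre]) ++ "<sep>" :: pvEmitA rest
termination_by toks.length
decreasing_by all_goals
  (have h1 := List.length_dropWhile_le pvNondelim toks; rw [h] at h1; simp at h1; omega)

-- pvPendingAtEos: proof-side characterisation of D_ on the decoded PAD/BOS-free stream
def pvPendingAtEos (s : List String) : Bool :=
  s.contains "<eos>" &&
    ((s.takeWhile (fun t => !(t = "<eos>"))).getLast?.elim false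
      (fun t => !(t = "<nl>") && !(t = "<sep>")))

theorem decode_eq (itos : List (Int × String)) (i : Int) :
    ((itos.find? (fun kv => i == kv.1)).map Prod.snd).getD "" = (itos.lookup i).getD "" := by
  induction itos with
  | nil => rfl
  | cons kv rest ih =>
      obtain ⟨k, v⟩ := kv
      by_cases h : (i == k) = true
      · simp [List.find?, List.lookup, h]
      · simp only [Bool.not_eq_true] at h
        simp [List.find?, List.lookup, h, ih]

theorem takeWhile_eq_take_idxOf (s : List String) :
    s.takeWhile (fun t => !(t = "<eos>")) = s.take (s.idxOf "<eos>") := by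
  induction s with
  | nil => rfl
  | cons a rest ih =>
      by_cases h : a = "<eos>"
      · subst h; simp [List.takeWhile_cons, List.idxOf_cons]
      · simp [List.takeWhile_cons, List.idxOf_cons, h, ih]

theorem getLastD_props (l : List String) :
    (l.getLast?.elim false (fun t => !(t = "<nl>") && !(t = "<sep>"))) = true ↔
      (l.getLastD "<nl>" ≠ "<nl>" ∧ l.getLastD "<nl>" ≠ "<sep>") := by
  rcases h : l.getLast? with _ | x <;>
    simp [Option.elim, List.getLastD_eq_getLast?, h]

theorem pvStream_eq (ids : List Int) (itos : List (Int × String)) :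
    pvStream ids itos = (ids.map (fun i => (itos.lookup i).getD "")).filter
      (fun t => !(t = "<pad>" || t = "<bos>")) := by
  induction ids with
  | nil => rfl
  | cons i ids ih =>
      simp only [pvStream, List.filterMap_cons, List.map_cons, List.filter_cons] at *
      rw [decode_eq]
      by_cases h : (itos.lookup i).getD "" = "<pad>" ∨ (itos.lookup i).getD "" = "<bos>"
      · have hb : (!((itos.lookup i).getD "" = "<pad>" || (itos.lookup i).getD "" = "<bos>" : Bool)) = false := by
          rcases h with h | h <;> simp [h]
        rw [if_pos h, hb]
        simpa using ih
      · have hb : (!((itos.lookup i).getD "" = "<pad>" || (itos.lookup i).getD "" = "<bos>" : Bool)) = true := by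
          push_neg at h
          simp [h.1, h.2]
        rw [if_neg h, hb]
        rw [ih]
        simp

theorem D_iff (ids : List Int) (itos : List (Int × String)) :
    D_token_ids_to_trace_lines ids itos ↔
      pvPendingAtEos ((ids.map (fun i => (itos.lookup i).getD "")).filter
        (fun t => !(t = "<pad>" || t = "<bos>"))) = true := by
  unfold D_token_ids_to_trace_lines
  rw [pvStream_eq]
  set s := (ids.map (fun i => (itos.lookup i).getD "")).filter
    (fun t => !(t = "<pad>" || t = "<bos>")) with hs
  simp only [pvPendingAtEos, Bool.and_eq_true]
  constructor
  · rintro ⟨h1, h2, h3⟩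
    refine ⟨?_, ?_⟩
    · simp only [List.contains_eq_mem, decide_eq_true_eq]
      exact List.idxOf_lt_length_iff.1 h1
    · rw [← takeWhile_eq_take_idxOf] at h2 h3
      exact (getLastD_props _).2 ⟨h2, h3⟩
  · rintro ⟨h1, h2⟩
    have hm : "<eos>" ∈ s := by simpa [List.contains_eq_mem] using h1
    obtain ⟨h2a, h2b⟩ := (getLastD_props _).1 h2
    rw [takeWhile_eq_take_idxOf] at h2a h2b
    exact ⟨List.idxOf_lt_length_iff.2 hm, h2a, h2b⟩

theorem takeWhile_append_all {α : Type} {p : α → Bool} {cur : List α} (l : List α)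
    (hc : ∀ t ∈ cur, p t = true) : (cur ++ l).takeWhile p = cur ++ l.takeWhile p := by
  induction cur with
  | nil => rfl
  | cons a as ih =>
      simp only [List.cons_append, List.takeWhile_cons, hc a (by simp)]
      simp [ih (fun t ht => hc t (by simp [ht]))]

theorem dropWhile_append_all {α : Type} {p : α → Bool} {cur : List α} (l : List α)
    (hc : ∀ t ∈ cur, p t = true) : (cur ++ l).dropWhile p = l.dropWhile p := by
  induction cur with
  | nil => rfl
  | cons a as ih =>
      simp only [List.cons_append, List.dropWhile_cons, hc a (by simp)]
      exact ih (fun t ht => hc t (by simp [ht]))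

-- evaluation of pvEmitA / pvEmit on an all-plain stream and on pre ++ delimiter :: rest
theorem pvEmitA_nodelim (cur : List String) (hc : ∀ t ∈ cur, pvNondelim t = true) :
    pvEmitA cur = if cur = [] then [] else [pvTokensToLine cur] := by
  have hd : cur.dropWhile pvNondelim = [] := by
    have := dropWhile_append_all (cur := cur) [] hc; simpa using this
  rw [pvEmitA.eq_def]
  split
  · rfl
  · rename_i t rest heq; rw [hd] at heq; cases heq

theorem pvEmit_nodelim (cur : List String) (hc : ∀ t ∈ cur, pvNondelim t = true) :
    pvEmit cur = if cur = [] then [] else [pvTokensToLine cur] := by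
  have hd : cur.dropWhile pvNondelim = [] := by
    have := dropWhile_append_all (cur := cur) [] hc; simpa using this
  rw [pvEmit.eq_def]
  split
  · rfl
  · rename_i t rest heq; rw [hd] at heq; cases heq

theorem pvEmitA_delim (cur l : List String) (t : String)
    (hc : ∀ x ∈ cur, pvNondelim x = true) (ht : pvNondelim t = false) :
    pvEmitA (cur ++ t :: l) =
      if t = "<eos>" then
        (if cur = [] then [] else [pvTokensToLine cur, pvTokensToLine cur])
      else if t = "<nl>" then pvTokensToLine cur :: pvEmitA l
      else (if cur = [] then [] else [pvTokensToLine cur]) ++ "<sep>" :: pvEmitA l := by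
  have hd : (cur ++ t :: l).dropWhile pvNondelim = t :: l := by
    rw [dropWhile_append_all _ hc]; simp [List.dropWhile_cons, ht]
  have hw : (cur ++ t :: l).takeWhile pvNondelim = cur := by
    rw [takeWhile_append_all _ hc]; simp [List.takeWhile_cons, ht]
  rw [pvEmitA.eq_def]
  split
  · rename_i heq; rw [hd] at heq; cases heq
  · rename_i t' rest heq
    rw [hd] at heq; injection heq with h1 h2; subst h1; subst h2
    simp only [hw]

theorem pvEmit_delim (cur l : List String) (t : String)
    (hc : ∀ x ∈ cur, pvNondelim x = true) (ht : pvNondelim t = false) :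
    pvEmit (cur ++ t :: l) =
      if t = "<eos>" then (if cur = [] then [] else [pvTokensToLine cur])
      else if t = "<nl>" then pvTokensToLine cur :: pvEmit l
      else (if cur = [] then [] else [pvTokensToLine cur]) ++ "<sep>" :: pvEmit l := by
  have hd : (cur ++ t :: l).dropWhile pvNondelim = t :: l := by
    rw [dropWhile_append_all _ hc]; simp [List.dropWhile_cons, ht]
  have hw : (cur ++ t :: l).takeWhile pvNondelim = cur := by
    rw [takeWhile_append_all _ hc]; simp [List.takeWhile_cons, ht]
  rw [pvEmit.eq_def]
  split
  · rename_i heq; rw [hd] at heq; cases heq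
  · rename_i t' rest heq
    rw [hd] at heq; injection heq with h1 h2; subst h1; subst h2
    simp only [hw]

-- A's streaming loop, started on a plain-token current, is pvEmitA of current ++ the
-- PAD/BOS-filtered remainder of the stream.
theorem pvLoopA_eq_emitA (tokens : List String) :
    ∀ (lines current : List String), (∀ t ∈ current, pvNondelim t = true) →
      pvLoopA tokens lines current =
        lines ++ pvEmitA (current ++ tokens.filter (fun t => !(t = "<pad>" || t = "<bos>"))) := by
  induction tokens with
  | nil =>
      intro lines current hc
      simp only [pvLoopA, List.filter_nil, List.append_nil, pvEmitA_nodelim current hc]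
      split <;> simp
  | cons t rest ih =>
      intro lines current hc
      simp only [pvLoopA]
      by_cases h1 : t = "<pad>" ∨ t = "<bos>"
      · rw [if_pos h1, ih _ _ hc]
        have : (List.filter (fun t => !(t = "<pad>" || t = "<bos>")) (t :: rest))
            = rest.filter (fun t => !(t = "<pad>" || t = "<bos>")) := by
          rcases h1 with h | h <;> subst h <;> simp
        rw [this]
      · rw [if_neg h1]
        push_neg at h1
        obtain ⟨hp, hb⟩ := h1
        have hfil : (List.filter (fun t => !(t = "<pad>" || t = "<bos>")) (t :: rest))
            = t :: rest.filter (fun t => !(t = "<pad>" || t = "<bos>")) := by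
          simp [List.filter_cons, hp, hb]
        rw [hfil]
        by_cases h2 : t = "<eos>"
        · subst h2
          rw [if_pos rfl, pvEmitA_delim _ _ _ hc (by simp [pvNondelim]), if_pos rfl]
          by_cases hcur : current = [] <;> simp [hcur]
        · rw [if_neg h2]
          by_cases h3 : t = "<nl>"
          · subst h3
            rw [if_pos rfl, pvEmitA_delim _ _ _ hc (by simp [pvNondelim])]
            rw [if_neg (show ¬("<nl>" = "<eos>") by decide), if_pos rfl]
            rw [ih _ [] (by simp)]
            simp
          · rw [if_neg h3]
            by_cases h4 : t = "<sep>"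
            · subst h4
              rw [if_pos rfl, pvEmitA_delim _ _ _ hc (by simp [pvNondelim])]
              rw [if_neg (show ¬("<sep>" = "<eos>") by decide),
                  if_neg (show ¬("<sep>" = "<nl>") by decide)]
              rw [ih _ [] (by simp)]
              rcases eq_or_ne current [] with hcur | hcur
              · subst hcur; simp
              · simp [hcur]
            · rw [if_neg h4]
              have hnd : pvNondelim t = true := by simp [pvNondelim, h2, h3, h4]
              rw [ih _ (current ++ [t]) (by
                intro x hx
                rcases List.mem_append.1 hx with hx | hx
                · exact hc x hx
                · simp at hx; subst hx; exact hnd)]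
              rw [List.append_assoc]
              rfl

-- transfer of the pending-at-EOS flag across one NEWLINE/SEP delimiter
theorem pending_cons (pre rest : List String) (t : String)
    (hc : ∀ x ∈ pre, pvNondelim x = true) (ht : t = "<nl>" ∨ t = "<sep>") :
    pvPendingAtEos rest = true → pvPendingAtEos (pre ++ t :: rest) = true := by
  intro h
  have hne : ∀ x ∈ pre, (fun s => !(s = "<eos>")) x = true := by
    intro x hx
    have := hc x hx
    simp [pvNondelim] at this
    simp [this.1]
  have hteos : ¬ t = "<eos>" := by rcases ht with h | h <;> subst h <;> decide
  have htw : (pre ++ t :: rest).takeWhile (fun s => !(s = "<eos>"))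
      = pre ++ t :: rest.takeWhile (fun s => !(s = "<eos>")) := by
    rw [takeWhile_append_all _ hne]; simp [List.takeWhile_cons, hteos]
  simp only [pvPendingAtEos, Bool.and_eq_true] at h ⊢
  refine ⟨?_, ?_⟩
  · simp only [List.contains_eq_mem, decide_eq_true_eq] at h ⊢
    exact List.mem_append.2 (Or.inr (List.mem_cons.2 (Or.inr h.1)))
  · rw [htw]
    rcases hlast : (rest.takeWhile (fun s => !(s = "<eos>"))).getLast? with _ | x
    · rw [hlast] at h
      exact absurd h.2 (by simp [Option.elim])
    · have : (pre ++ t :: rest.takeWhile (fun s => !(s = "<eos>"))).getLast? = some x := by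
        rw [show pre ++ t :: rest.takeWhile (fun s => !(s = "<eos>"))
              = (pre ++ [t]) ++ rest.takeWhile (fun s => !(s = "<eos>")) by simp]
        rw [List.getLast?_append_of_ne_nil _ (by intro hnil; rw [hnil] at hlast; cases hlast)]
        exact hlast
      rw [this]
      rw [hlast] at h
      exact h.2

theorem pending_uncons (pre rest : List String) (t : String)
    (hc : ∀ x ∈ pre, pvNondelim x = true) (ht : t = "<nl>" ∨ t = "<sep>") :
    pvPendingAtEos (pre ++ t :: rest) = true → pvPendingAtEos rest = true := by
  intro h
  have hne : ∀ x ∈ pre, (fun s => !(s = "<eos>")) x = true := by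
    intro x hx
    have := hc x hx
    simp [pvNondelim] at this
    simp [this.1]
  have hteos : ¬ t = "<eos>" := by rcases ht with h | h <;> subst h <;> decide
  have htw : (pre ++ t :: rest).takeWhile (fun s => !(s = "<eos>"))
      = pre ++ t :: rest.takeWhile (fun s => !(s = "<eos>")) := by
    rw [takeWhile_append_all _ hne]; simp [List.takeWhile_cons, hteos]
  simp only [pvPendingAtEos, Bool.and_eq_true] at h ⊢
  obtain ⟨hmem, hlastp⟩ := h
  rw [htw] at hlastp
  refine ⟨?_, ?_⟩
  · simp only [List.contains_eq_mem, decide_eq_true_eq] at hmem ⊢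
    rcases List.mem_append.1 hmem with hx | hx
    · exact absurd (hne _ hx) (by simp)
    · rcases List.mem_cons.1 hx with hx | hx
      · exact absurd hx.symm hteos
      · exact hx
  · rcases hlast : (rest.takeWhile (fun s => !(s = "<eos>"))).getLast? with _ | x
    · exfalso
      have hnil : rest.takeWhile (fun s => !(s = "<eos>")) = [] :=
        List.getLast?_eq_none_iff.1 hlast
      rw [hnil] at hlastp
      have : (pre ++ [t]).getLast? = some t := by simp
      rw [this] at hlastp
      rcases ht with h | h <;> subst h <;> exact absurd hlastp (by simp [Option.elim])
    · have : (pre ++ t :: rest.takeWhile (fun s => !(s = "<eos>"))).getLast? = some x := by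
        rw [show pre ++ t :: rest.takeWhile (fun s => !(s = "<eos>"))
              = (pre ++ [t]) ++ rest.takeWhile (fun s => !(s = "<eos>")) by simp]
        rw [List.getLast?_append_of_ne_nil _ (by intro hnil; rw [hnil] at hlast; cases hlast)]
        exact hlast
      rw [this] at hlastp
      exact hlastp

-- decomposition of a stream at its first delimiter
theorem dropWhile_cons_prop {α : Type} {p : α → Bool} :
    ∀ {l : List α} {t rest}, l.dropWhile p = t :: rest →
      p t = false ∧ l.takeWhile p ++ t :: rest = l := by
  intro l
  induction l with
  | nil => intro t rest h; cases h
  | cons a as ih =>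
      intro t rest h
      by_cases hp : p a = true
      · rw [List.dropWhile_cons, if_pos hp] at h
        obtain ⟨h1, h2⟩ := ih h
        refine ⟨h1, ?_⟩
        rw [List.takeWhile_cons, if_pos hp, List.cons_append, h2]
      · rw [List.dropWhile_cons, if_neg hp] at h
        injection h with h1 h2; subst h1; subst h2
        refine ⟨by simpa using hp, ?_⟩
        rw [List.takeWhile_cons, if_neg hp]; rfl

theorem mem_takeWhile_nondelim {toks : List String} {x : String}
    (hx : x ∈ toks.takeWhile pvNondelim) : pvNondelim x = true :=
  List.mem_takeWhile_imp hx

-- no pending line at EOS ⇒ the double-flushing emitter agrees with pvEmit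
theorem pvEmitA_eq_pvEmit_aux : ∀ (n : Nat) (toks : List String), toks.length ≤ n →
    pvPendingAtEos toks = false → pvEmitA toks = pvEmit toks := by
  intro n
  induction n with
  | zero =>
      intro toks hlen _
      have h0 : toks = [] := List.length_eq_zero_iff.1 (Nat.le_zero.1 hlen)
      subst h0
      rw [pvEmitA_nodelim [] (by simp), pvEmit_nodelim [] (by simp)]
  | succ m ih =>
      intro toks hlen hD
      rcases hdw : toks.dropWhile pvNondelim with _ | ⟨t, rest⟩
      · have hall : ∀ x ∈ toks, pvNondelim x = true := by
          intro x hx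
          have htd := List.takeWhile_append_dropWhile (p := pvNondelim) (l := toks)
          rw [hdw, List.append_nil] at htd
          exact mem_takeWhile_nondelim (by rw [htd]; exact hx)
        rw [pvEmitA_nodelim _ hall, pvEmit_nodelim _ hall]
      · obtain ⟨htf, hdec⟩ := dropWhile_cons_prop hdw
        set pre := toks.takeWhile pvNondelim with hpre
        have hcpre : ∀ x ∈ pre, pvNondelim x = true := fun x hx => mem_takeWhile_nondelim hx
        have hlenrest : rest.length ≤ m := by
          have hlen2 : pre.length + (t :: rest).length = toks.length := by
            rw [← List.length_append, hdec]
          simp at hlen2; omega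
        rw [← hdec, pvEmitA_delim _ _ _ hcpre htf, pvEmit_delim _ _ _ hcpre htf]
        by_cases h2 : t = "<eos>"
        · subst h2
          have hpre_nil : pre = [] := by
            by_contra hne
            have hl : pre.getLast? = some (pre.getLast hne) := List.getLast?_eq_some_getLast hne
            have hx := hcpre _ (List.getLast_mem hne)
            simp [pvNondelim] at hx
            have hne2 : ∀ x ∈ pre, (fun s => !(s = "<eos>")) x = true := by
              intro x hxx
              have hnd := hcpre x hxx
              simp [pvNondelim] at hnd
              simp [hnd.1]
            have htw : toks.takeWhile (fun s => !(s = "<eos>")) = pre := by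
              conv_lhs => rw [← hdec]
              rw [takeWhile_append_all _ hne2]
              simp [List.takeWhile_cons]
            have hpend : pvPendingAtEos toks = true := by
              simp only [pvPendingAtEos, Bool.and_eq_true]
              refine ⟨?_, ?_⟩
              · simp only [List.contains_eq_mem, decide_eq_true_eq]
                rw [← hdec]
                exact List.mem_append.2 (Or.inr (List.mem_cons.2 (Or.inl rfl)))
              · rw [htw, hl]
                simp [Option.elim, hx.1.2, hx.2]
            rw [hpend] at hD; cases hD
          simp [hpre_nil]
        · have ht : t = "<nl>" ∨ t = "<sep>" := by
            simp [pvNondelim, h2] at htf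
            tauto
          have hDrest : pvPendingAtEos rest = false := by
            by_contra hx
            have h1 := pending_cons pre rest t hcpre ht (by simpa using hx)
            rw [hdec] at h1
            rw [hD] at h1
            exact absurd h1 (by decide)
          rcases ht with h3 | h3 <;> subst h3 <;> simp [ih rest hlenrest hDrest]

-- a pending line at EOS ⇒ A's emitter is exactly one line longer than pvEmit
theorem pvEmitA_len_aux : ∀ (n : Nat) (toks : List String), toks.length ≤ n →
    pvPendingAtEos toks = true → (pvEmitA toks).length = (pvEmit toks).length + 1 := by
  intro n
  induction n with
  | zero =>
      intro toks hlen hD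
      have h0 : toks = [] := List.length_eq_zero_iff.1 (Nat.le_zero.1 hlen)
      subst h0; cases hD
  | succ m ih =>
      intro toks hlen hD
      rcases hdw : toks.dropWhile pvNondelim with _ | ⟨t, rest⟩
      · exfalso
        have hall : ∀ x ∈ toks, pvNondelim x = true := by
          intro x hx
          have htd := List.takeWhile_append_dropWhile (p := pvNondelim) (l := toks)
          rw [hdw, List.append_nil] at htd
          exact mem_takeWhile_nondelim (by rw [htd]; exact hx)
        simp only [pvPendingAtEos, Bool.and_eq_true, List.contains_eq_mem,
          decide_eq_true_eq] at hD
        have hx := hall _ hD.1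
        simp [pvNondelim] at hx
      · obtain ⟨htf, hdec⟩ := dropWhile_cons_prop hdw
        set pre := toks.takeWhile pvNondelim with hpre
        have hcpre : ∀ x ∈ pre, pvNondelim x = true := fun x hx => mem_takeWhile_nondelim hx
        have hlenrest : rest.length ≤ m := by
          have hlen2 : pre.length + (t :: rest).length = toks.length := by
            rw [← List.length_append, hdec]
          simp at hlen2; omega
        rw [← hdec, pvEmitA_delim _ _ _ hcpre htf, pvEmit_delim _ _ _ hcpre htf]
        by_cases h2 : t = "<eos>"
        · subst h2
          have hpre_ne : ¬ pre = [] := by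
            intro hnil
            have htw : toks.takeWhile (fun s => !(s = "<eos>")) = [] := by
              conv_lhs => rw [← hdec]
              rw [hnil]
              simp [List.takeWhile_cons]
            simp only [pvPendingAtEos, Bool.and_eq_true] at hD
            rw [htw] at hD
            exact absurd hD.2 (by simp [Option.elim])
          simp [hpre_ne]
        · have ht : t = "<nl>" ∨ t = "<sep>" := by
            simp [pvNondelim, h2] at htf
            tauto
          have hDrest : pvPendingAtEos rest = true := by
            apply pending_uncons pre rest t hcpre ht
            rw [hdec]; exact hD
          have hlenr := ih rest hlenrest hDrest
          rcases ht with h3 | h3 <;> subst h3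
          · simp [hlenr]
          · by_cases hcur : pre = [] <;> simp [hcur, hlenr]

theorem pvEmitA_eq_pvEmit (toks : List String)
    (hD : pvPendingAtEos toks = false) : pvEmitA toks = pvEmit toks :=
  pvEmitA_eq_pvEmit_aux toks.length toks (Nat.le_refl _) hD

theorem pvEmitA_ne_pvEmit (toks : List String)
    (hD : pvPendingAtEos toks = true) : (pvEmitA toks).length = (pvEmit toks).length + 1 :=
  pvEmitA_len_aux toks.length toks (Nat.le_refl _) hD

-- B's port at the diff witness (pvEmit is well-founded recursion, so computed by hand here)
theorem alt_at_diff_witness :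
    token_ids_to_trace_lines_alt (pvDiffWitness_token_ids_to_trace_lines.1)
      (pvDiffWitness_token_ids_to_trace_lines.2) = [">>> print 5"] := by
  show pvEmit [">>>", "print", "5", "<eos>"] = [">>> print 5"]
  rw [pvEmit.eq_def]
  split
  · rename_i heq; exact absurd heq (by decide)
  · rename_i t rest heq
    have h2 : List.dropWhile pvNondelim [">>>", "print", "5", "<eos>"] = ["<eos>"] := by decide
    rw [h2] at heq
    injection heq with h3 h4
    subst h3; subst h4
    decide

-- ===== VERDICT (by name: the statements are the Claim_ definitions above) =====
theorem token_ids_to_trace_lines_spec : Claim_unchanged_token_ids_to_trace_lines := by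
  intro ids itos _ _ hD
  have hD' : pvPendingAtEos ((ids.map (fun i => (itos.lookup i).getD "")).filter
      (fun t => !(t = "<pad>" || t = "<bos>"))) = false := by
    cases h : pvPendingAtEos ((ids.map (fun i => (itos.lookup i).getD "")).filter
      (fun t => !(t = "<pad>" || t = "<bos>")))
    · rfl
    · exact absurd ((D_iff ids itos).2 h) hD
  unfold token_ids_to_trace_lines token_ids_to_trace_lines_alt
  rw [pvLoopA_eq_emitA _ [] [] (by simp)]
  simp only [List.nil_append]
  exact pvEmitA_eq_pvEmit _ hD' 

theorem token_ids_to_trace_lines_changed : Claim_changed_token_ids_to_trace_lines := by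
  unfold Claim_changed_token_ids_to_trace_lines
  refine ⟨by decide, by decide, by decide, by decide, alt_at_diff_witness, by decide⟩

theorem token_ids_to_trace_lines_tight : Claim_exact_token_ids_to_trace_lines := by
  intro ids itos _ _ hD
  have hD' := (D_iff ids itos).1 hD
  unfold token_ids_to_trace_lines token_ids_to_trace_lines_alt
  rw [pvLoopA_eq_emitA _ [] [] (by simp)]
  simp only [List.nil_append]
  intro heq
  have hlen := pvEmitA_ne_pvEmit _ hD'
  rw [heq] at hlen
  omega
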